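-- pv_equiv track=rewrite | github.com/DoreenP8387631eggy/csv-surgeon | csv_surgeon/ranger.py | skip_rows
-- ===== SOURCE A (Python) =====
-- from typing import Iterable, Iterator, Dict
--
-- def skip_rows(
--     rows: Iterable[Dict[str, str]],
--     n: int,
-- ) -> Iterator[Dict[str, str]]:
--     """Skip the first *n* rows and yield the rest."""
--     if n < 0:
--         raise ValueError("n must be >= 0")
--     for index, row in enumerate(rows):
--         if index >= n:
--             yield row
-- ===== SOURCE B (Python) =====
-- _SENTINEL = object()
--
-- def skip_rows(rows, n):
--     """Skip the first *n* rows and yield the rest: drain up to n items, then pass through."""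
--     if n < 0:
--         raise ValueError("n must be >= 0")
--     it = iter(rows)
--     for _ in range(n):
--         if next(it, _SENTINEL) is _SENTINEL:
--             break
--     yield from it
-- ===== Notes on version B (the rewrite author's own statement) =====
-- stated objective: idiomatic
-- what changed: Replaces the enumerate pass with a per-row index comparison by two phases over an explicit iterator: a counted drain of the first n items, then yielding the remaining tail with no per-element test.
import Mathlib
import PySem

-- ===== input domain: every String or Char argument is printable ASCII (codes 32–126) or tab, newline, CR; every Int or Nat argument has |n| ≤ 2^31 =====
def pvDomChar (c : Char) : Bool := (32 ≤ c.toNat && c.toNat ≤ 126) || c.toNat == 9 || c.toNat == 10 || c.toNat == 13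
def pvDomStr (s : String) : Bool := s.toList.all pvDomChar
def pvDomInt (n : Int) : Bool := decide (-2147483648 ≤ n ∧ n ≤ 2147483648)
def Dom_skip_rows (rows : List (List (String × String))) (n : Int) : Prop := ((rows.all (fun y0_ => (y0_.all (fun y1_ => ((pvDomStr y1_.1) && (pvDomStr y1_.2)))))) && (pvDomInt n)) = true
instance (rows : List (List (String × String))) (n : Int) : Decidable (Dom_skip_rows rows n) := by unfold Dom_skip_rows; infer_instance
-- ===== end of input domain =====

-- B replaces the enumerate-with-per-row-comparison pass by two phases (a counted drain of the
-- first n rows, then passing the tail through unchanged); objective: idiomatic, same cost.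
-- Both Pythons are generators; equivalence is about the list of yielded rows.

-- ===== PORT A =====
-- for index, row in enumerate(rows): if index >= n: yield row
def skip_rows (rows : List (List (String × String))) (n : Int) : List (List (String × String)) :=
  (PySem.List.enumerate rows 0).foldl
    (fun acc p => if n ≤ p.1 then acc ++ [p.2] else acc) []

-- ===== PORT B =====
-- it = iter(rows); for _ in range(n): if next(it, _SENTINEL) is _SENTINEL: break; yield from it
-- pvDrain k it: the counted drain loop — one next() per step, break when the iterator is exhausted
def pvDrain {α : Type} : Nat → List α → List α
  | 0, it => it
  | _ + 1, [] => []
  | k + 1, _ :: t => pvDrain k t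

def skip_rows_alt (rows : List (List (String × String))) (n : Int) : List (List (String × String)) :=
  pvDrain n.toNat rows

-- ===== PRECONDITION & SPEC =====
-- Pre_ excludes exactly n < 0, where the Python A raises ValueError (B raises there too).
def Pre_skip_rows (_rows : List (List (String × String))) (n : Int) : Prop := 0 ≤ n
instance (rows : List (List (String × String))) (n : Int) : Decidable (Pre_skip_rows rows n) := by unfold Pre_skip_rows; infer_instance
def pvWitness_skip_rows : (List (List (String × String))) × Int := ([[("a", "1")], [("b", "2")], [("c", "3")]], 1)

def Spec_skip_rows (rows : List (List (String × String))) (n : Int) (out : List (List (String × String))) : Prop := out = skip_rows_alt rows n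
instance (rows : List (List (String × String))) (n : Int) (out : List (List (String × String))) : Decidable (Spec_skip_rows rows n out) := by unfold Spec_skip_rows; infer_instance

-- ===== CLAIM (what is proved, stated in full; the proofs are below) =====
def Claim_equal_skip_rows : Prop := ∀ (rows : List (List (String × String))) (n : Int), Dom_skip_rows rows n → Pre_skip_rows rows n → Spec_skip_rows rows n (skip_rows rows n)

-- ===== LEMMAS AND PROOFS =====

-- A's enumerate-and-compare pass, started at any counter value s, keeps exactly the drop.
theorem skipA_eq_drop {α : Type} (rows : List α) (n : Int) :
    ∀ (s : Int) (acc : List α),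
      (PySem.List.enumerate rows s).foldl (fun acc p => if n ≤ p.1 then acc ++ [p.2] else acc) acc
        = acc ++ rows.drop (n - s).toNat := by
  induction rows with
  | nil => intro s acc; simp [PySem.List.enumerate_nil]
  | cons x xs ih =>
    intro s acc
    rw [PySem.List.enumerate_cons]
    simp only [List.foldl_cons]
    by_cases h : n ≤ s
    · have h0 : (n - s).toNat = 0 := by omega
      have h1 : (n - (s + 1)).toNat = 0 := by omega
      rw [if_pos h, ih (s + 1), h0, h1]
      simp
    · have h0 : (n - s).toNat = (n - (s + 1)).toNat + 1 := by omega
      rw [if_neg h, ih (s + 1), h0]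
      simp

-- B's counted drain (with its early break) is exactly the drop.
theorem pvDrain_eq_drop {α : Type} : ∀ (k : Nat) (rows : List α), pvDrain k rows = rows.drop k
  | 0, _ => by simp [pvDrain]
  | _ + 1, [] => by simp [pvDrain]
  | k + 1, x :: t => by simp [pvDrain, pvDrain_eq_drop k t]

-- ===== VERDICT (by name: the statement is the Claim_ definition above) =====
theorem skip_rows_spec : Claim_equal_skip_rows := by
  intro rows n _ _
  unfold Spec_skip_rows skip_rows skip_rows_alt
  rw [skipA_eq_drop rows n 0 [], pvDrain_eq_drop]
  simp
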